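-- pv_equiv track=rewrite | github.com/irvind/pyhttp2 | pyhttp2/hpack.py | uint_decode
-- ===== SOURCE A (Python) =====
-- def uint_decode(array, n=8):
--     """
--     Decodes unsigned integer accoriding to [RFC7541, section 5.1].
--
--     :param array:
--         pass
--     :param n:
--         pass
--     """
--     ind = 0
--     i = array[ind] & 2**n - 1
--     if i < 2**n - 1:
--         return i
--
--     m = 0
--     while True:
--         ind += 1
--         b = array[ind]
--         i += (b & 127) * 2**m
--         m += 7
--
--         if b & 128 != 128:
--             break
--
--     return i
-- ===== SOURCE B (Python) =====
-- def uint_decode(array, n=8):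
--     mask = 2**n - 1
--     i = array[0] & mask
--     if i < mask:
--         return i
--     # pass 1: collect 7-bit continuation payloads
--     chunks = []
--     ind = 0
--     while True:
--         ind += 1
--         b = array[ind]
--         chunks.append(b & 127)
--         if b & 128 != 128:
--             break
--     # pass 2: Horner fold, most-significant chunk first
--     val = 0
--     for p in reversed(chunks):
--         val = val * 128 + p
--     return i + val
-- ===== Notes on version B (the rewrite author's own statement) =====
-- stated objective: alternative
-- what changed: Replaces A's single loop that accumulates with a running power-of-two weight (i += (b&127)*2**m; m += 7) by a two-pass build-then-fold shape: first collect the 7-bit payloads into a list, then combine them most-significant-first with a Horner fold (val = val*128 + p).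
import Mathlib
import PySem

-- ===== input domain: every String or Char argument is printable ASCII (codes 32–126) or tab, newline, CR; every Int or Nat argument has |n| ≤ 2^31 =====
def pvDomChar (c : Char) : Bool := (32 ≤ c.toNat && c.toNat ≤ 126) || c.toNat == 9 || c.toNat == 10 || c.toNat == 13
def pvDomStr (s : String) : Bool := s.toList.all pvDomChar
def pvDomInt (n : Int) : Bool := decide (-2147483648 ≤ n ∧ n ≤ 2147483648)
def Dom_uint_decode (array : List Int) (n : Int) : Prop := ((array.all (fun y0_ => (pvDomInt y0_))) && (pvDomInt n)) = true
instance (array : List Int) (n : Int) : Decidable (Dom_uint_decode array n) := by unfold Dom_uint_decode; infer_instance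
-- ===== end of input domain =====

-- B changes the decomposition only (two passes: collect payload bytes, then a Horner fold), not the speed.

-- ===== PORT A =====
-- A's while-True loop: ind advances through the array; recursion on the remaining suffix.
-- On truncated input Python raises IndexError (the [] case); excluded by Pre_.
-- m is always a nonnegative multiple of 7, kept as Nat.
def uintDecodeLoopA : List Int → Int → Nat → Int
  | [], i, _ => i            -- array[ind] would raise IndexError; outside Pre_
  | b :: rest, i, m =>
    let i' := i + (PySem.Int.band b 127) * 2 ^ m
    if PySem.Int.band b 128 ≠ 128 then i' else uintDecodeLoopA rest i' (m + 7)

def uint_decode (array : List Int) (n : Int) : Int :=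
  match array with
  | [] => 0                  -- array[0] raises IndexError; outside Pre_
  | a :: rest =>
    let i := PySem.Int.band a ((2 : Int) ^ n.toNat - 1)   -- 2**n: Python raises for n<0 (float &); Pre_ has 0 ≤ n
    if i < (2 : Int) ^ n.toNat - 1 then i
    else uintDecodeLoopA rest i 0

-- ===== PORT B =====
-- pass 1 of Source B: chunks.append(b & 127), break when the high bit is clear
def uintDecodeCollect : List Int → List Int
  | [] => []                 -- array[ind] raises IndexError; outside Pre_
  | b :: rest =>
    if PySem.Int.band b 128 ≠ 128 then [PySem.Int.band b 127] else (PySem.Int.band b 127) :: uintDecodeCollect rest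

def uint_decode_alt (array : List Int) (n : Int) : Int :=
  match array with
  | [] => 0                  -- array[0] raises IndexError; outside Pre_
  | a :: rest =>
    let mask := (2 : Int) ^ n.toNat - 1
    let i := PySem.Int.band a mask
    if i < mask then i
    else
      -- pass 2 of Source B: Horner fold over reversed(chunks)
      i + (uintDecodeCollect rest).reverse.foldl (fun v p => v * 128 + p) 0

-- ===== PRECONDITION & SPEC =====
-- Pre_ excludes exactly the inputs where Python A raises: n < 0 (2**n is a float, TypeError
-- in '&'), the empty array, and truncated input (no continuation byte at index ≥ 1 with the
-- high bit clear after a full-prefix first byte) — IndexError.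
def Pre_uint_decode (array : List Int) (n : Int) : Prop :=
  0 ≤ n ∧ array ≠ [] ∧
    (PySem.Int.band (array.getD 0 0) ((2 : Int) ^ n.toNat - 1) < (2 : Int) ^ n.toNat - 1 ∨
      ∃ k ∈ List.range array.length, 1 ≤ k ∧ PySem.Int.band (array.getD k 0) 128 ≠ 128)
instance (array : List Int) (n : Int) : Decidable (Pre_uint_decode array n) := by
  unfold Pre_uint_decode; infer_instance

def pvWitness_uint_decode : List Int × Int := ([255, 3], 8)

def Spec_uint_decode (array : List Int) (n : Int) (out : Int) : Prop := out = uint_decode_alt array n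
instance (array : List Int) (n : Int) (out : Int) : Decidable (Spec_uint_decode array n out) := by unfold Spec_uint_decode; infer_instance

-- ===== CLAIM (what is proved, stated in full; the proofs are below) =====
def Claim_equal_uint_decode : Prop := ∀ (array : List Int) (n : Int), Dom_uint_decode array n → Pre_uint_decode array n → Spec_uint_decode array n (uint_decode array n)

-- ===== LEMMAS AND PROOFS =====

-- A's running-weight loop equals B's collect-then-Horner value (for every suffix, so the
-- claim holds without case analysis on Pre_).
theorem uintDecodeLoopA_eq (rest : List Int) (i : Int) (m : Nat) :
    uintDecodeLoopA rest i m =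
      i + ((uintDecodeCollect rest).reverse.foldl (fun v p => v * 128 + p) 0) * 2 ^ m := by
  induction rest generalizing i m with
  | nil => simp [uintDecodeLoopA, uintDecodeCollect]
  | cons b rest ih =>
    by_cases h : PySem.Int.band b 128 ≠ 128
    · simp [uintDecodeLoopA, uintDecodeCollect, h]
    · simp [uintDecodeLoopA, uintDecodeCollect, h, ih]
      rw [pow_add]
      ring

-- ===== VERDICT (by name: the statement is the Claim_ definition above) =====
theorem uint_decode_spec : Claim_equal_uint_decode := by
  intro array n _ _
  unfold Spec_uint_decode uint_decode uint_decode_alt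
  cases array with
  | nil => rfl
  | cons a rest =>
    simp only []
    split
    · rfl
    · rw [uintDecodeLoopA_eq]; ring
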